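-- pv_equiv track=rewrite | github.com/rceuls/snake_advent | snek_advent/day_14.py | shake_stones
-- ===== SOURCE A (Python) =====
-- ROUNDED = "O"
--
-- CUBED = "#"
--
-- EMPTY = "."
--
-- EOL = "EOL"
--
-- DIR_NORTH = "N"
--
-- DIR_WEST = "W"
--
-- DIR_SOUTH = "S"
--
-- DIR_EAST = "E"
--
-- LEFT = "L"
--
-- RIGHT = "R"
--
-- def get_stone_or_skip(start_index: int, line: str):
--     substr = line[start_index:]
--     for ix, char in zip(range(len(substr)), substr):
--         if char == ROUNDED or char == CUBED:
--             return (ix + start_index, substr[ix])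
--     return (-1, EOL)
--
-- def update_line(line: str, drop_to_the: LEFT or RIGHT):
--     working_copy = list(line)
--     if drop_to_the == RIGHT:
--         working_copy = list(line[::-1])
--     for x in range(len(working_copy)):
--         if working_copy[x] == EMPTY:
--             (index, type) = get_stone_or_skip(x, working_copy)
--             if type == ROUNDED:
--                 working_copy[index] = EMPTY
--                 working_copy[x] = ROUNDED
--             elif type == CUBED:
--                 x = index
--     if drop_to_the == RIGHT:
--         return working_copy[::-1]
--     return working_copy
--
-- def shake_stones(
--     lines,
--     direction: DIR_NORTH or DIR_WEST or DIR_SOUTH or DIR_EAST = DIR_NORTH,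
-- ):
--     if direction == DIR_NORTH or direction == DIR_SOUTH:
--         for x in range(len(lines)):
--             line = list()
--             for y in range(len(lines[0])):
--                 line.append(lines[y][x])
--             updated_line = update_line(
--                 "".join(line), RIGHT if direction == DIR_SOUTH else LEFT
--             )
--             for y1 in range(len(lines[0])):
--                 lines[y1][x] = updated_line[y1]
--     elif direction == DIR_EAST or direction == DIR_WEST:
--         for ix in range(len(lines)):
--             updated_line = update_line(
--                 "".join(lines[ix]), RIGHT if direction == DIR_EAST else DIR_WEST
--             )
--             del lines[ix]
--             lines.insert(ix, updated_line)
--     return lines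
-- ===== SOURCE B (Python) =====
-- ROUNDED = "O"
-- CUBED = "#"
-- EMPTY = "."
-- DIR_NORTH = "N"
-- DIR_WEST = "W"
-- DIR_SOUTH = "S"
-- DIR_EAST = "E"
--
--
-- def _tilt(line: str, to_right: bool) -> str:
--     """Tilt one line of cells: every rounded stone rolls to the lowest free
--     cell of its '#'-free segment, in a single split/count/refill pass."""
--     s = line[::-1] if to_right else line
--     out_parts = []
--     for seg in s.split(CUBED):
--         k = seg.count(ROUNDED)
--         buf = []
--         for c in seg:
--             if c == EMPTY or c == ROUNDED:
--                 if k > 0: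
--                     buf.append(ROUNDED)
--                     k -= 1
--                 else:
--                     buf.append(EMPTY)
--             else:
--                 buf.append(c)
--         out_parts.append("".join(buf))
--     out = CUBED.join(out_parts)
--     return out[::-1] if to_right else out
--
--
-- def shake_stones(lines, direction=DIR_NORTH):
--     # NOTE: unlike the original, this returns a fresh grid for N/S/E/W
--     # instead of mutating `lines` in place; the returned value is the same.
--     if direction == DIR_NORTH or direction == DIR_SOUTH:
--         cols = ["".join(t) for t in zip(*lines)]
--         tilted = [_tilt(c, direction == DIR_SOUTH) for c in cols]
--         width = len(lines[0]) if lines else 0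
--         return [[tilted[x][y] for x in range(len(cols))] for y in range(width)]
--     elif direction == DIR_EAST or direction == DIR_WEST:
--         return [list(_tilt("".join(row), direction == DIR_EAST)) for row in lines]
--     return lines
-- ===== Notes on version B (the rewrite author's own statement) =====
-- stated objective: alternative
-- what changed: A re-scans forward from every empty cell to find the next stone; B tilts each line by splitting on '#', counting the 'O's of each segment and refilling the segment's slots, and builds the N/S result from a single zip-transpose instead of A's in-place per-column write-back.
-- outside the precondition, e.g. on shake_stones([['.O']], 'N'): A returns [['O']], B returns [['O']]
import Mathlib
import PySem

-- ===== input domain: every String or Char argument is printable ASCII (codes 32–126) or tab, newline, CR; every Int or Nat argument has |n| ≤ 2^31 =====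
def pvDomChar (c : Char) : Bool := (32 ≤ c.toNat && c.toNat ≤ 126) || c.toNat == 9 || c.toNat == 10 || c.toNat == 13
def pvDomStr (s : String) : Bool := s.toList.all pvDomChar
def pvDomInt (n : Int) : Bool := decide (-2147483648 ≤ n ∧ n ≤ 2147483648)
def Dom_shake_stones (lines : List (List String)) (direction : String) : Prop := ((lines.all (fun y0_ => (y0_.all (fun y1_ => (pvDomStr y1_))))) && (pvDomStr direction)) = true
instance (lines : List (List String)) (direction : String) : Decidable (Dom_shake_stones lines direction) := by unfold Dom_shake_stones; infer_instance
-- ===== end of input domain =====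

-- B re-implements the per-line tilt as a single split('#')/count/refill pass instead of A's
-- per-empty-cell forward scan; equivalence is about the RETURN value only (A mutates `lines`
-- in place, B builds fresh rows for the four compass directions).

-- ===== PORT A =====

-- get_stone_or_skip's scan over the dropped suffix: first index (in the suffix) holding 'O' or '#'
def pvFindStone : List Char → Option (Nat × Char)
  | [] => none
  | c :: t =>
    if c = 'O' ∨ c = '#' then some (0, c)
    else (pvFindStone t).map (fun p => (p.1 + 1, p.2))

-- one iteration of update_line's `for x in range(len(working_copy))` body
def pvUpdA (w : List Char) (x : Nat) : List Char :=
  if w.getD x ' ' = '.' then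
    match pvFindStone (w.drop x) with
    | some (i, ch) =>
      if ch = 'O' then (w.set (x + i) '.').set x 'O'
      else w  -- CUBED branch only rebinds the loop variable, a Python no-op
    | none => w
  else w

-- update_line (drop_to_the == RIGHT ↔ right = true); line[::-1] ported as List.reverse (exact)
def pvLineA (line : List Char) (right : Bool) : List Char :=
  let w := if right then line.reverse else line
  let w := (List.range w.length).foldl pvUpdA w
  if right then w.reverse else w

def pvSetCell (g : List (List String)) (y x : Nat) (v : String) : List (List String) :=
  g.set y ((g.getD y []).set x v)

def shake_stones (lines : List (List String)) (direction : String) : List (List String) :=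
  if direction = "N" ∨ direction = "S" then
    (List.range lines.length).foldl
      (fun g x =>
        let w0 := (g.headD []).length
        -- the inner `line.append` loop, then "".join (join ported as flatMap toList, exact)
        let cells := (List.range w0).foldl (fun acc y => acc ++ [(g.getD y []).getD x ""]) []
        let upd := pvLineA (cells.flatMap String.toList) (direction == "S")
        (List.range w0).foldl
          (fun g2 y1 => pvSetCell g2 y1 x (String.ofList [upd.getD y1 ' '])) g)
      lines
  else if direction = "E" ∨ direction = "W" then
    (List.range lines.length).foldl
      (fun g ix =>
        let upd := pvLineA ((g.getD ix []).flatMap String.toList) (direction == "E")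
        -- `del lines[ix]; lines.insert(ix, updated_line)` = replace row ix
        g.set ix (upd.map (fun c => String.ofList [c])))
      lines
  else lines

-- ===== PORT B =====

-- str.split('#') ported by hand (exact for a single-char separator):
-- first segment plus the list of the remaining segments
def pvSplitH : List Char → List Char × List (List Char)
  | [] => ([], [])
  | c :: t =>
    let p := pvSplitH t
    if c = '#' then ([], p.1 :: p.2) else (c :: p.1, p.2)

-- the refill loop: every '.'/'O' slot gets 'O' while k > 0, then '.', other chars unchanged
def pvFill : Nat → List Char → List Char
  | _, [] => []
  | k, c :: t =>
    if c = '.' ∨ c = 'O' then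
      if 0 < k then 'O' :: pvFill (k - 1) t else '.' :: pvFill k t
    else c :: pvFill k t

-- _tilt: reverse if rolling right, split on '#', count-and-refill each segment, '#'.join
def pvTiltB (line : List Char) (right : Bool) : List Char :=
  let s := if right then line.reverse else line
  let p := pvSplitH s
  let out := pvFill (p.1.count 'O') p.1 ++ p.2.flatMap (fun seg => '#' :: pvFill (seg.count 'O') seg)
  if right then out.reverse else out

def shake_stones_alt (lines : List (List String)) (direction : String) : List (List String) :=
  if direction = "N" ∨ direction = "S" then
    -- zip(*lines) truncates to the shortest row; "".join each column tuple
    let m := ((lines.map List.length).min?).getD 0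
    let cols := (List.range m).map (fun x => lines.flatMap (fun row => (row.getD x "").toList))
    let tilted := cols.map (fun c => pvTiltB c (direction == "S"))
    (List.range (lines.headD []).length).map
      (fun y => (List.range cols.length).map
        (fun x => String.ofList [(tilted.getD x []).getD y ' ']))
  else if direction = "E" ∨ direction = "W" then
    lines.map (fun row =>
      (pvTiltB (row.flatMap String.toList) (direction == "E")).map (fun c => String.ofList [c]))
  else lines

-- ===== PRECONDITION & SPEC =====

-- Pre_ restricts the N/S (column-tilting) case to square grids of single-character cells:
-- on almost every other shape A raises IndexError, and on the few remaining ones (ragged rows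
-- longer than the grid height, multi-character cells) A's partial write-back through
-- lines[y1][x] = updated_line[y1] is an indexing artefact nobody would specify.
-- E/W and unknown directions are unrestricted.
def Pre_shake_stones (lines : List (List String)) (direction : String) : Prop :=
  direction = "N" ∨ direction = "S" →
    ∀ row ∈ lines, row.length = lines.length ∧ ∀ cell ∈ row, cell.toList.length = 1

instance (lines : List (List String)) (direction : String) : Decidable (Pre_shake_stones lines direction) := by
  unfold Pre_shake_stones; infer_instance

def pvWitness_shake_stones : List (List String) × String :=
  ([[".", "O"], ["#", "."]], "N")

def Spec_shake_stones (lines : List (List String)) (direction : String) (out : List (List String)) : Prop := out = shake_stones_alt lines direction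
instance (lines : List (List String)) (direction : String) (out : List (List String)) : Decidable (Spec_shake_stones lines direction out) := by unfold Spec_shake_stones; infer_instance

-- ===== CLAIM (what is proved, stated in full; the proofs are below) =====
def Claim_equal_shake_stones : Prop := ∀ (lines : List (List String)) (direction : String), Dom_shake_stones lines direction → Pre_shake_stones lines direction → Spec_shake_stones lines direction (shake_stones lines direction)

-- ===== LEMMAS AND PROOFS =====

-- B's tilt core (right = false), the common value both per-line passes compute
def pvCore (l : List Char) : List Char :=
  pvFill ((pvSplitH l).1.count 'O') (pvSplitH l).1
    ++ (pvSplitH l).2.flatMap (fun seg => '#' :: pvFill (seg.count 'O') seg)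

lemma splitH_append_free (a t : List Char) (h : ∀ c ∈ a, c ≠ '#') :
    pvSplitH (a ++ t) = (a ++ (pvSplitH t).1, (pvSplitH t).2) := by
  induction a with
  | nil => simp
  | cons c a ih =>
    have hc : c ≠ '#' := h c (by simp)
    have ih' := ih (fun x hx => h x (by simp [hx]))
    simp [pvSplitH, ih', hc]

lemma splitH_no_hash (l : List Char) (h : ∀ c ∈ l, c ≠ '#') : pvSplitH l = (l, []) := by
  have := splitH_append_free l [] h
  simpa [pvSplitH] using this

lemma findStone_none (t : List Char) (h : pvFindStone t = none) :
    ∀ c ∈ t, c ≠ 'O' ∧ c ≠ '#' := by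
  induction t with
  | nil => simp
  | cons c t ih =>
    by_cases hc : c = 'O' ∨ c = '#'
    · simp [pvFindStone, hc] at h
    · simp only [pvFindStone, if_neg hc, Option.map_eq_none_iff] at h
      intro x hx
      rcases List.mem_cons.mp hx with rfl | hx'
      · exact ⟨fun h' => hc (Or.inl h'), fun h' => hc (Or.inr h')⟩
      · exact ih h x hx' 

lemma findStone_some (t : List Char) (i : Nat) (ch : Char) (h : pvFindStone t = some (i, ch)) :
    (ch = 'O' ∨ ch = '#') ∧
      ∃ a b, t = a ++ ch :: b ∧ a.length = i ∧ ∀ c ∈ a, c ≠ 'O' ∧ c ≠ '#' := by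
  induction t generalizing i with
  | nil => simp [pvFindStone] at h
  | cons c t ih =>
    by_cases hc : c = 'O' ∨ c = '#'
    · simp only [pvFindStone, if_pos hc, Option.some.injEq, Prod.mk.injEq] at h
      obtain ⟨rfl, rfl⟩ := h
      exact ⟨hc, [], t, rfl, rfl, by simp⟩
    · simp only [pvFindStone, if_neg hc, Option.map_eq_some_iff] at h
      obtain ⟨⟨j, ch'⟩, hj, hji⟩ := h
      obtain ⟨h1, h2⟩ := Prod.mk.injEq .. ▸ hji
      obtain ⟨hchs, a, b, rfl, rfl, hfree⟩ := ih j (by rw [hj]; cases h2; rfl)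
      refine ⟨hchs, c :: a, b, by cases h2; rfl, by simpa using h1.symm ▸ rfl, ?_⟩
      intro x hx
      rcases List.mem_cons.mp hx with rfl | hx'
      · exact ⟨fun h' => hc (Or.inl h'), fun h' => hc (Or.inr h')⟩
      · exact hfree x hx' 

lemma fill_zero_noO (l : List Char) (h : ∀ c ∈ l, c ≠ 'O') : pvFill 0 l = l := by
  induction l with
  | nil => rfl
  | cons c t ih =>
    have hc := h c (by simp)
    have ih' := ih (fun x hx => h x (by simp [hx]))
    by_cases hs : c = '.' ∨ c = 'O'
    · have hcd : c = '.' := by tauto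
      subst hcd
      simp [pvFill, ih']
    · simp [pvFill, hs, ih']

lemma fill_slot_swap (a b : List Char) (m : Nat) :
    pvFill m (a ++ 'O' :: b) = pvFill m (a ++ '.' :: b) := by
  induction a generalizing m with
  | nil => simp [pvFill]
  | cons c a ih =>
    simp only [List.cons_append, pvFill]
    split_ifs <;> simp [ih]

lemma count_noO (a : List Char) (h : ∀ c ∈ a, c ≠ 'O') : a.count 'O' = 0 := by
  rw [List.count_eq_zero]
  intro hmem
  exact h _ hmem rfl

lemma cons_free {P : Char → Prop} (c : Char) (t : List Char) (hc : P c)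
    (h : ∀ x ∈ t, P x) : ∀ x ∈ c :: t, P x := by
  intro x hx
  rcases List.mem_cons.mp hx with rfl | hx'
  · exact hc
  · exact h x hx'

lemma pvCore_cons_hash (t : List Char) : pvCore ('#' :: t) = '#' :: pvCore t := by
  simp [pvCore, pvSplitH, pvFill]

lemma pvCore_cons_O (t : List Char) : pvCore ('O' :: t) = 'O' :: pvCore t := by
  simp [pvCore, pvSplitH, pvFill]

lemma pvCore_cons_other (c : Char) (t : List Char) (h1 : c ≠ '#') (h2 : c ≠ '.') (h3 : c ≠ 'O') :
    pvCore (c :: t) = c :: pvCore t := by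
  simp [pvCore, pvSplitH, pvFill, h1, h2, h3]

lemma pvCore_dot_none (t : List Char) (h : pvFindStone t = none) :
    pvCore ('.' :: t) = '.' :: pvCore t := by
  have hfree := findStone_none t h
  have hnoO : ∀ c ∈ t, c ≠ 'O' := fun c hc => (hfree c hc).1
  have hs1 := splitH_no_hash ('.' :: t)
    (cons_free '.' t (by decide) (fun c hc => (hfree c hc).2))
  have hs2 := splitH_no_hash t (fun c hc => (hfree c hc).2)
  have hc1 : ('.' :: t).count 'O' = 0 := count_noO _ (cons_free '.' t (by decide) hnoO)
  have hc2 : t.count 'O' = 0 := count_noO _ hnoO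
  have hf : pvFill 0 t = t := fill_zero_noO t hnoO
  simp [pvCore, hs1, hs2, hc1, hc2, pvFill, hf]

lemma pvCore_dot_hash (t : List Char) (i : Nat) (h : pvFindStone t = some (i, '#')) :
    pvCore ('.' :: t) = '.' :: pvCore t := by
  obtain ⟨-, a, b, rfl, -, hfree⟩ := findStone_some t i '#' h
  have hfa : ∀ c ∈ a, c ≠ '#' := fun c hc => (hfree c hc).2
  have hnoO : ∀ c ∈ a, c ≠ 'O' := fun c hc => (hfree c hc).1
  have h1 : pvSplitH ('.' :: (a ++ '#' :: b)) = ('.' :: a ++ (pvSplitH ('#' :: b)).1, (pvSplitH ('#' :: b)).2) := by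
    have := splitH_append_free ('.' :: a) ('#' :: b) (cons_free '.' a (by decide) hfa)
    simpa using this
  have h2 : pvSplitH (a ++ '#' :: b) = (a ++ (pvSplitH ('#' :: b)).1, (pvSplitH ('#' :: b)).2) :=
    splitH_append_free a ('#' :: b) hfa
  have hcnt : ('.' :: a).count 'O' = 0 := count_noO _ (cons_free '.' a (by decide) hnoO)
  have hcnt' : a.count 'O' = 0 := count_noO a hnoO
  have hfl : pvFill 0 a = a := fill_zero_noO a hnoO
  simp [pvCore, h2, pvSplitH, hcnt, hcnt', pvFill, hfl]

lemma pvCore_dot_O (t : List Char) (i : Nat) (h : pvFindStone t = some (i, 'O')) :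
    pvCore ('.' :: t) = 'O' :: pvCore (t.set i '.') := by
  obtain ⟨-, a, b, rfl, rfl, hfree⟩ := findStone_some t i 'O' h
  have hfa : ∀ c ∈ a, c ≠ '#' := fun c hc => (hfree c hc).2
  have hnoO : ∀ c ∈ a, c ≠ 'O' := fun c hc => (hfree c hc).1
  have hcnt' : a.count 'O' = 0 := count_noO a hnoO
  have hset : (a ++ 'O' :: b).set a.length '.' = a ++ '.' :: b := by
    simp [List.set_append]
  rw [hset]
  have h1 : pvSplitH ('.' :: (a ++ 'O' :: b)) = ('.' :: a ++ (pvSplitH ('O' :: b)).1, (pvSplitH ('O' :: b)).2) := by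
    have := splitH_append_free ('.' :: a) ('O' :: b) (cons_free '.' a (by decide) hfa)
    simpa using this
  have h2 : pvSplitH (a ++ '.' :: b) = (a ++ (pvSplitH ('.' :: b)).1, (pvSplitH ('.' :: b)).2) :=
    splitH_append_free a ('.' :: b) hfa
  have hsO : pvSplitH ('O' :: b) = ('O' :: (pvSplitH b).1, (pvSplitH b).2) := by
    simp [pvSplitH]
  have hsD : pvSplitH ('.' :: b) = ('.' :: (pvSplitH b).1, (pvSplitH b).2) := by
    simp [pvSplitH]
  simp only [pvCore, h1, hsO, h2, hsD, List.cons_append]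
  have hk1 : List.count 'O' ('.' :: (a ++ 'O' :: (pvSplitH b).1)) = (pvSplitH b).1.count 'O' + 1 := by
    simp [List.count_append, hcnt']
  have hk2 : List.count 'O' (a ++ '.' :: (pvSplitH b).1) = (pvSplitH b).1.count 'O' := by
    simp [List.count_append, hcnt']
  rw [hk1, hk2]
  have hfill : pvFill ((pvSplitH b).1.count 'O' + 1) ('.' :: (a ++ 'O' :: (pvSplitH b).1))
      = 'O' :: pvFill ((pvSplitH b).1.count 'O') (a ++ '.' :: (pvSplitH b).1) := by
    simp [pvFill, fill_slot_swap]
  rw [hfill]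
  simp

-- A's update loop, with the already-processed prefix split off, computes pvCore of the suffix
lemma set_append_after {α : Type} (p l : List α) (k : Nat) (v : α) :
    (p ++ l).set (p.length + k) v = p ++ l.set k v := by
  rw [List.set_append, if_neg (by omega), Nat.add_sub_cancel_left]

lemma set_append_at {α : Type} (p l : List α) (v : α) :
    (p ++ l).set p.length v = p ++ l.set 0 v := by
  simpa using set_append_after p l 0 v

lemma loopA_eq (n : Nat) : ∀ (w p : List Char), w.length = n →
    (List.range' p.length w.length).foldl pvUpdA (p ++ w) = p ++ pvCore w := by
  induction n using Nat.strong_induction_on with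
  | _ n ih =>
    intro w p hw
    match w with
    | [] => simp [pvCore, pvSplitH, pvFill]
    | c :: t =>
      have hlt : t.length < n := by simp at hw; omega
      rw [show (c :: t).length = t.length + 1 from rfl, List.range'_succ]
      simp only [List.foldl_cons]
      have hget : (p ++ c :: t).getD p.length ' ' = c := by
        simp [List.getD]
      have hdrop : (p ++ c :: t).drop p.length = c :: t := List.drop_left
      by_cases hc : c = '.'
      · subst hc
        have hfs0 : pvFindStone ('.' :: t) = (pvFindStone t).map (fun p => (p.1 + 1, p.2)) := by
          simp [pvFindStone]
        cases hfs : pvFindStone t with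
        | none =>
          have hstep : pvUpdA (p ++ '.' :: t) p.length = p ++ '.' :: t := by
            simp only [pvUpdA, hget, hdrop, hfs0, hfs, Option.map_none]
            simp
          rw [hstep]
          have := ih t.length hlt t (p ++ ['.']) rfl
          rw [pvCore_dot_none t hfs]
          simpa using this
        | some pr =>
          obtain ⟨i, ch⟩ := pr
          by_cases hO : ch = 'O'
          · subst hO
            have hstep : pvUpdA (p ++ '.' :: t) p.length
                = p ++ 'O' :: t.set i '.' := by
              simp only [pvUpdA, hget, hdrop, hfs0, hfs, Option.map_some]
              simp only [if_true]
              rw [set_append_after p ('.' :: t) (i + 1) '.']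
              rw [show ('.' :: t).set (i + 1) '.' = '.' :: t.set i '.' from rfl]
              rw [set_append_at]
              rfl
            rw [hstep]
            have := ih t.length hlt (t.set i '.') (p ++ ['O']) (by simp)
            rw [pvCore_dot_O t i hfs]
            simpa using this
          · have hch : ch = '#' := by
              rcases (findStone_some t i ch hfs).1 with h1 | h1
              · exact absurd h1 hO
              · exact h1
            subst hch
            have hstep : pvUpdA (p ++ '.' :: t) p.length = p ++ '.' :: t := by
              simp only [pvUpdA, hget, hdrop, hfs0, hfs, Option.map_some]
              simp
            rw [hstep]
            have := ih t.length hlt t (p ++ ['.']) rfl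
            rw [pvCore_dot_hash t i hfs]
            simpa using this
      · have hstep : pvUpdA (p ++ c :: t) p.length = p ++ c :: t := by
          simp only [pvUpdA, hget]
          rw [if_neg hc]
        rw [hstep]
        have := ih t.length hlt t (p ++ [c]) rfl
        by_cases h1 : c = '#'
        · subst h1; rw [pvCore_cons_hash]; simpa using this
        · by_cases h2 : c = 'O'
          · subst h2; rw [pvCore_cons_O]; simpa using this
          · rw [pvCore_cons_other c t h1 hc h2]; simpa using this

lemma lineA_eq_tiltB (l : List Char) (right : Bool) : pvLineA l right = pvTiltB l right := by
  have core : ∀ m : List Char, (List.range m.length).foldl pvUpdA m = pvCore m := by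
    intro m
    have := loopA_eq m.length m [] rfl
    simpa [List.range_eq_range'] using this
  cases right with
  | false =>
    simp [pvLineA, pvTiltB, core l, pvCore]
  | true =>
    have core' : (List.range l.length).foldl pvUpdA l.reverse = pvCore l.reverse := by
      simpa using core l.reverse
    simp [pvLineA, pvTiltB, core', pvCore]


-- ===== grid-level proofs =====

lemma map_range_getD {α : Type} (n y : Nat) (f : Nat → α) (d : α) (hy : y < n) :
    ((List.range n).map f).getD y d = f y := by
  simp [List.getD_eq_getElem?_getD, List.getElem?_map, List.getElem?_range hy]

-- the row-by-row E/W loop (replace row ix by f of its current value) is List.map f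
lemma foldl_set_row {α : Type} (f : α → α) (d : α) (g : List α) :
    (List.range g.length).foldl (fun h ix => h.set ix (f (h.getD ix d))) g = g.map f := by
  have aux : ∀ k, k ≤ g.length →
      (List.range k).foldl (fun h ix => h.set ix (f (h.getD ix d))) g
        = (g.take k).map f ++ g.drop k := by
    intro k
    induction k with
    | zero => simp
    | succ k ihk =>
      intro hk
      have hk' : k < g.length := hk
      rw [List.range_succ, List.foldl_append, ihk (by omega), List.foldl_cons, List.foldl_nil]
      have hlen : ((g.take k).map f).length = k := by
        simp [List.length_take]
        omega
      have hgetD : ((g.take k).map f ++ g.drop k).getD k d = g[k] := by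
        rw [List.getD_eq_getElem?_getD, List.getElem?_append_right (by omega), hlen,
          Nat.sub_self, List.getElem?_drop]
        simp [List.getElem?_eq_getElem hk']
      rw [hgetD]
      have hset := set_append_at ((g.take k).map f) (g.drop k) (f g[k])
      rw [hlen] at hset
      rw [hset, List.drop_eq_getElem_cons hk', List.take_add_one,
        List.getElem?_eq_getElem hk']
      simp only [List.set_cons_zero, Option.toList_some, List.map_append, List.map_cons,
        List.map_nil, List.append_assoc, List.cons_append, List.nil_append]
  have := aux g.length (le_refl _)
  simpa using this

def pvCell (lines : List (List String)) (y x : Nat) : String := (lines.getD y []).getD x ""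

def pvColF (lines : List (List String)) (x : Nat) : List Char :=
  (List.range lines.length).flatMap (fun y => (pvCell lines y x).toList)

def pvVal (lines : List (List String)) (right : Bool) (x y : Nat) : String :=
  String.ofList [(pvLineA (pvColF lines x) right).getD y ' ']

def pvGridK (lines : List (List String)) (right : Bool) (k : Nat) : List (List String) :=
  (List.range lines.length).map (fun y => (List.range lines.length).map
    (fun x => if x < k then pvVal lines right x y else pvCell lines y x))

lemma min?_replicate (n v : Nat) (hn : 0 < n) : (List.replicate n v).min? = some v := by
  induction n with
  | zero => omega
  | succ n ih =>
    cases n with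
    | zero => simp [List.min?_cons]
    | succ m =>
      rw [List.replicate_succ, List.min?_cons, ih (by omega)]
      simp

lemma min_len_eq (lines : List (List String))
    (hsq : ∀ row ∈ lines, row.length = lines.length) :
    ((lines.map List.length).min?).getD 0 = lines.length := by
  by_cases hl : lines = []
  · subst hl; simp
  · have hrep : lines.map List.length = List.replicate lines.length lines.length := by
      rw [List.eq_replicate_iff]
      refine ⟨by simp, ?_⟩
      intro b hb
      obtain ⟨row, hrow, rfl⟩ := List.mem_map.mp hb
      exact hsq row hrow
    rw [hrep, min?_replicate _ _ (List.length_pos_of_ne_nil hl)]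
    rfl

lemma lines_canon (lines : List (List String))
    (hsq : ∀ row ∈ lines, row.length = lines.length) :
    lines = (List.range lines.length).map
      (fun y => (List.range lines.length).map (fun x => pvCell lines y x)) := by
  apply List.ext_getElem?
  intro y
  by_cases hy : y < lines.length
  · rw [List.getElem?_map, List.getElem?_range hy, List.getElem?_eq_getElem hy]
    simp only [Option.map_some, Option.some.injEq]
    have hrl : lines[y].length = lines.length := hsq _ (List.getElem_mem hy)
    apply List.ext_getElem?
    intro x
    by_cases hx : x < lines.length
    · rw [List.getElem?_map, List.getElem?_range hx,
        List.getElem?_eq_getElem (by omega : x < lines[y].length)]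
      simp only [Option.map_some, Option.some.injEq]
      simp [pvCell, List.getD_eq_getElem?_getD, List.getElem?_eq_getElem hy,
        List.getElem?_eq_getElem (by omega : x < lines[y].length)]
    · rw [List.getElem?_map, List.getElem?_eq_none (by rw [hrl]; omega),
        List.getElem?_eq_none (by rw [List.length_range]; omega)]
      rfl
  · rw [List.getElem?_map, List.getElem?_eq_none (by omega),
      List.getElem?_eq_none (by rw [List.length_range]; omega)]
    rfl

lemma setfold_len (m x : Nat) (v : Nat → String) (g : List (List String)) :
    ((List.range m).foldl (fun g2 y1 => pvSetCell g2 y1 x (v y1)) g).length = g.length := by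
  induction m with
  | zero => simp
  | succ m ih =>
    have hone : ∀ (h : List (List String)),
        (pvSetCell h m x (v m)).length = h.length := by
      intro h
      simp [pvSetCell]
    rw [List.range_succ, List.foldl_append, List.foldl_cons, List.foldl_nil, hone, ih]

lemma setfold_get (m x : Nat) (v : Nat → String) (g : List (List String)) (y : Nat) :
    ((List.range m).foldl (fun g2 y1 => pvSetCell g2 y1 x (v y1)) g)[y]? =
      if y < m then (g[y]?).map (fun row => row.set x (v y)) else g[y]? := by
  induction m with
  | zero => simp
  | succ m ih =>
    have hset : ∀ (h : List (List String)) (w : Nat),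
        pvSetCell h w x (v w) = h.set w ((h.getD w []).set x (v w)) := fun _ _ => rfl
    have hlen := setfold_len m x v g
    rw [List.range_succ, List.foldl_append, List.foldl_cons, List.foldl_nil, hset,
      List.getElem?_set, hlen]
    by_cases hym : m = y
    · subst hym
      rw [if_pos rfl, if_pos (Nat.lt_succ_self m)]
      by_cases hm : m < g.length
      · rw [if_pos hm, List.getElem?_eq_getElem hm, Option.map_some]
        have hgd : (((List.range m).foldl (fun g2 y1 => pvSetCell g2 y1 x (v y1)) g).getD m [])
            = g[m] := by
          rw [List.getD_eq_getElem?_getD, ih, if_neg (by omega), List.getElem?_eq_getElem hm]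
          rfl
        rw [hgd]
      · rw [if_neg hm, List.getElem?_eq_none (by omega), Option.map_none]
    · rw [if_neg hym, ih]
      by_cases hy : y < m
      · rw [if_pos hy, if_pos (by omega)]
      · rw [if_neg hy, if_neg (by omega)]

lemma gridk_headD_len (lines : List (List String)) (right : Bool) (k : Nat)
    (hn : 0 < lines.length) :
    ((pvGridK lines right k).headD []).length = lines.length := by
  obtain ⟨m, hm⟩ : ∃ m, lines.length = m + 1 := ⟨lines.length - 1, by omega⟩
  unfold pvGridK
  rw [hm, List.range_eq_range', List.range'_succ, List.map_cons, List.headD_cons]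
  simp

lemma gridk_getElem? (lines : List (List String)) (right : Bool) (k y : Nat) :
    (pvGridK lines right k)[y]? =
      if hy : y < lines.length then
        some ((List.range lines.length).map
          (fun x => if x < k then pvVal lines right x y else pvCell lines y x))
      else none := by
  unfold pvGridK
  by_cases hy : y < lines.length
  · rw [List.getElem?_map, List.getElem?_range hy, dif_pos hy]
    rfl
  · rw [List.getElem?_map, List.getElem?_eq_none (by rw [List.length_range]; omega), dif_neg hy]
    rfl

lemma ns_step (lines : List (List String)) (right : Bool) (k : Nat)
    (hk : k < lines.length) :
    (let g := pvGridK lines right k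
     let w0 := (g.headD []).length
     let cells := (List.range w0).foldl (fun acc y => acc ++ [(g.getD y []).getD k ""]) []
     let upd := pvLineA (cells.flatMap String.toList) right
     (List.range w0).foldl
       (fun g2 y1 => pvSetCell g2 y1 k (String.ofList [upd.getD y1 ' '])) g)
    = pvGridK lines right (k + 1) := by
  have hn : 0 < lines.length := by omega
  simp only []
  rw [gridk_headD_len lines right k hn]
  have hcells : (List.range lines.length).foldl
      (fun acc y => acc ++ [((pvGridK lines right k).getD y []).getD k ""]) []
      = (List.range lines.length).map (fun y => pvCell lines y k) := by
    rw [PySem.List.foldl_append_singleton_eq_map, List.nil_append]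
    apply List.map_congr_left
    intro y hy
    have hy' : y < lines.length := List.mem_range.mp hy
    unfold pvGridK
    rw [map_range_getD _ _ _ _ hy', map_range_getD _ _ _ _ hk, if_neg (lt_irrefl k)]
  rw [hcells, List.flatMap_map]
  have hcol : (List.range lines.length).flatMap (fun y => (pvCell lines y k).toList)
      = pvColF lines k := rfl
  rw [hcol]
  show (List.range lines.length).foldl
      (fun g2 y1 => pvSetCell g2 y1 k (pvVal lines right k y1)) (pvGridK lines right k)
    = pvGridK lines right (k + 1)
  apply List.ext_getElem?
  intro y
  rw [setfold_get, gridk_getElem?, gridk_getElem?]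
  by_cases hy : y < lines.length
  · rw [if_pos hy, dif_pos hy, dif_pos hy, Option.map_some]
    congr 1
    apply List.ext_getElem?
    intro x
    rw [List.getElem?_set]
    by_cases hkx : k = x
    · subst hkx
      rw [if_pos rfl, if_pos (by rw [List.length_map, List.length_range]; omega),
        List.getElem?_map, List.getElem?_range hk]
      simp
    · rw [if_neg hkx, List.getElem?_map, List.getElem?_map]
      by_cases hx : x < lines.length
      · rw [List.getElem?_range hx]
        simp only [Option.map_some, Option.some.injEq]
        by_cases hxk : x < k
        · rw [if_pos hxk, if_pos (by omega)]
        · rw [if_neg hxk, if_neg (by omega)]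
      · rw [List.getElem?_eq_none (by rw [List.length_range]; omega)]
        rfl
  · rw [if_neg (by omega), dif_neg hy, dif_neg hy]

lemma ns_fold (lines : List (List String)) (right : Bool)
    (hsq : ∀ row ∈ lines, row.length = lines.length) :
    ∀ k, k ≤ lines.length →
    (List.range k).foldl
      (fun g x =>
        let w0 := (g.headD []).length
        let cells := (List.range w0).foldl (fun acc y => acc ++ [(g.getD y []).getD x ""]) []
        let upd := pvLineA (cells.flatMap String.toList) right
        (List.range w0).foldl
          (fun g2 y1 => pvSetCell g2 y1 x (String.ofList [upd.getD y1 ' '])) g)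
      lines
    = pvGridK lines right k := by
  intro k
  induction k with
  | zero =>
    intro _
    simp only [List.range_zero, List.foldl_nil]
    unfold pvGridK
    conv_lhs => rw [lines_canon lines hsq]
    apply List.map_congr_left
    intro y _
    apply List.map_congr_left
    intro x _
    rw [if_neg (Nat.not_lt_zero x)]
  | succ k ih =>
    intro hk
    rw [List.range_succ, List.foldl_append, ih (by omega), List.foldl_cons, List.foldl_nil]
    exact ns_step lines right k (by omega)

lemma ns_eq (lines : List (List String)) (right : Bool)
    (hsq : ∀ row ∈ lines, row.length = lines.length) :
    (List.range lines.length).foldl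
      (fun g x =>
        let w0 := (g.headD []).length
        let cells := (List.range w0).foldl (fun acc y => acc ++ [(g.getD y []).getD x ""]) []
        let upd := pvLineA (cells.flatMap String.toList) right
        (List.range w0).foldl
          (fun g2 y1 => pvSetCell g2 y1 x (String.ofList [upd.getD y1 ' '])) g)
      lines
    =
    (let m := ((lines.map List.length).min?).getD 0
     let cols := (List.range m).map (fun x => lines.flatMap (fun row => (row.getD x "").toList))
     let tilted := cols.map (fun c => pvTiltB c right)
     (List.range (lines.headD []).length).map
       (fun y => (List.range cols.length).map
         (fun x => String.ofList [(tilted.getD x []).getD y ' ']))) := by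
  by_cases hnil : lines = []
  · subst hnil
    simp
  · have hn : 0 < lines.length := List.length_pos_of_ne_nil hnil
    rw [ns_fold lines right hsq lines.length (le_refl _)]
    simp only []
    rw [min_len_eq lines hsq]
    have hhd : (lines.headD []).length = lines.length := by
      cases lines with
      | nil => exact absurd rfl hnil
      | cons r t =>
        rw [List.headD_cons]
        exact hsq r (List.mem_cons_self)
    rw [hhd, List.length_map, List.length_range]
    have hcolB : ∀ x, x < lines.length →
        lines.flatMap (fun row => (row.getD x "").toList) = pvColF lines x := by
      intro x hx
      conv_lhs => rw [lines_canon lines hsq]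
      rw [List.flatMap_map]
      unfold pvColF
      apply List.flatMap_congr
      intro y _
      rw [map_range_getD _ _ _ _ hx]
    unfold pvGridK
    apply List.map_congr_left
    intro y _
    apply List.map_congr_left
    intro x hx
    have hx' : x < lines.length := List.mem_range.mp hx
    rw [if_pos hx', List.map_map, map_range_getD _ _ _ _ hx']
    unfold pvVal
    simp only [Function.comp_apply]
    rw [hcolB x hx', lineA_eq_tiltB]

-- ===== VERDICT (by name: the statement is the Claim_ definition above) =====
theorem shake_stones_spec : Claim_equal_shake_stones := by
  intro lines direction hdom hpre
  unfold Spec_shake_stones shake_stones shake_stones_alt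
  by_cases h1 : direction = "N" ∨ direction = "S"
  · rw [if_pos h1, if_pos h1]
    exact ns_eq lines (direction == "S") (fun r hr => (hpre h1 r hr).1)
  · rw [if_neg h1, if_neg h1]
    by_cases h2 : direction = "E" ∨ direction = "W"
    · rw [if_pos h2, if_pos h2]
      have hfold := foldl_set_row
        (fun row => (pvLineA (row.flatMap String.toList) (direction == "E")).map
          (fun c => String.ofList [c])) ([] : List String) lines
      rw [show (List.range lines.length).foldl
            (fun g ix =>
              let upd := pvLineA ((g.getD ix []).flatMap String.toList) (direction == "E")
              g.set ix (upd.map (fun c => String.ofList [c]))) lines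
          = lines.map (fun row =>
              (pvLineA (row.flatMap String.toList) (direction == "E")).map
                (fun c => String.ofList [c])) from hfold]
      apply List.map_congr_left
      intro r _
      rw [lineA_eq_tiltB]
    · rw [if_neg h2, if_neg h2]
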